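-- pv_equiv track=rewrite | github.com/minsung37/Algorithm | etc/programmers/실전대비/1-1.py | solution
-- ===== SOURCE A (Python) =====
-- def solution(X, Y):
--     intersection = []
--     y = list(Y)
--     for i in X:
--         if i in y:
--             intersection.append(i)
--             y.remove(i)
--     check = set(intersection)
--     if len(intersection) == 0:
--         return "-1"
--     elif len(check) == 1 and "0" in check:
--         return "0"
--     else:
--         return "".join(sorted(intersection, reverse=True))
-- ===== SOURCE B (Python) =====
-- def solution(X, Y):
--     xs = sorted(X, reverse=True)
--     ys = sorted(Y, reverse=True)
--     res = []
--     i = j = 0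
--     while i < len(xs) and j < len(ys):
--         if xs[i] == ys[j]:
--             res.append(xs[i])
--             i += 1
--             j += 1
--         elif xs[i] > ys[j]:
--             i += 1
--         else:
--             j += 1
--     if not res:
--         return "-1"
--     if all(c == "0" for c in res):
--         return "0"
--     return "".join(res)
-- ===== Notes on version B (the rewrite author's own statement) =====
-- stated objective: faster
-- what changed: Replaces A's per-character inner scan with list.remove on a shrinking copy of Y (plus a final sort of the intersection) by sorting both strings descending once and computing the common multiset with a single two-pointer merge that emits the result already in descending order.
import Mathlib
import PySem

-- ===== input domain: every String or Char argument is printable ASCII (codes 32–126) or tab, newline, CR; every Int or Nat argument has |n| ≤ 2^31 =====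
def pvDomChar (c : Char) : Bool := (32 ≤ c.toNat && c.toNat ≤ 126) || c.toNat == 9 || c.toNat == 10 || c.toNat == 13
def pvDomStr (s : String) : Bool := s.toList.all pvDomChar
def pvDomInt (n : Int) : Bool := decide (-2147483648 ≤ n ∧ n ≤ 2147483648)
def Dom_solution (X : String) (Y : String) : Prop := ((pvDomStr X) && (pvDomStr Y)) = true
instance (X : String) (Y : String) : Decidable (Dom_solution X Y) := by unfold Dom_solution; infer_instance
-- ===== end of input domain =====

-- B replaces A's per-character scan-and-remove over a shrinking copy of Y (plus a final
-- sort) by one descending sort of each string and a two-pointer merge that emits the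
-- common multiset already in descending order (alternative algorithm, same results).

-- ===== PORT A =====
-- A's for-loop over X; state = (intersection, y); 'y.remove(i)' after an 'i in y' check = List.erase
def solutionLoop (inter : List Char) (y : List Char) : List Char → List Char × List Char
  | [] => (inter, y)
  | i :: rest =>
    if i ∈ y then solutionLoop (inter ++ [i]) (y.erase i) rest
    else solutionLoop inter y rest

def solution (X : String) (Y : String) : String :=
  let st := solutionLoop [] Y.toList X.toList
  let intersection := st.1
  let check : PySem.Set Char := PySem.Set.ofList intersection
  if intersection.length = 0 then "-1"
  else if PySem.Set.len check = 1 ∧ '0' ∈ check then "0"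
  else String.ofList (PySem.List.sorted intersection (fun c => c) true)

-- ===== PORT B =====
-- B's while-loop with two advancing pointers, as recursion on the two descending lists
def mergeCommon : List Char → List Char → List Char
  | [], _ => []
  | _ :: _, [] => []
  | a :: as, b :: bs =>
    if a = b then a :: mergeCommon as bs
    else if b < a then mergeCommon as (b :: bs)
    else mergeCommon (a :: as) bs
termination_by xs ys => xs.length + ys.length

def solution_alt (X : String) (Y : String) : String :=
  let xs := PySem.List.sorted X.toList (fun c => c) true
  let ys := PySem.List.sorted Y.toList (fun c => c) true
  let res := mergeCommon xs ys
  if res = [] then "-1"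
  else if res.all (fun c => c == '0') then "0"
  else String.ofList res

-- ===== PRECONDITION & SPEC =====
def Spec_solution (X : String) (Y : String) (out : String) : Prop := out = solution_alt X Y
instance (X : String) (Y : String) (out : String) : Decidable (Spec_solution X Y out) := by unfold Spec_solution; infer_instance

-- ===== CLAIM (what is proved, stated in full; the proofs are below) =====
def Claim_equal_solution : Prop := ∀ (X : String) (Y : String), Dom_solution X Y → Spec_solution X Y (solution X Y)

-- ===== LEMMAS AND PROOFS =====

-- A's loop builds the multiset min of the counts, in X's order
theorem solutionLoop_count (xs : List Char) (inter y : List Char) (c : Char) :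
    (solutionLoop inter y xs).1.count c = inter.count c + min (xs.count c) (y.count c) := by
  induction xs generalizing inter y with
  | nil => simp [solutionLoop]
  | cons i rest ih =>
    simp only [solutionLoop]
    split
    · rename_i hmem
      rw [ih]
      have he : (y.erase i).count c = y.count c - if c = i then 1 else 0 := by
        rw [List.count_erase]; by_cases hc : c = i
        · simp [hc]
        · have : ¬ i = c := fun h => hc h.symm
          simp [this, hc]
      have hy : 0 < y.count i := List.count_pos_iff.mpr hmem
      simp only [List.count_append, List.count_cons, he]
      by_cases hc : c = i
      · subst hc; simp; omega
      · simp [hc, Ne.symm hc]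
    · rename_i hmem
      rw [ih]
      have hy : y.count i = 0 := List.count_eq_zero.mpr hmem
      simp only [List.count_cons]
      by_cases hc : c = i
      · subst hc; simp [hy]
      · simp [Ne.symm hc]

theorem mem_mergeCommon {x : Char} (xs ys : List Char) (h : x ∈ mergeCommon xs ys) : x ∈ xs := by
  fun_induction mergeCommon xs ys with
  | case1 => exact absurd h (by simp)
  | case2 => exact absurd h (by simp)
  | case3 as a bs ih =>
    rcases List.mem_cons.mp h with h1 | h1
    · simp [h1]
    · exact List.mem_cons_of_mem _ (ih h1)
  | case4 a as b bs hab hlt ih =>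
    exact List.mem_cons_of_mem _ (ih h)
  | case5 a as b bs hab hlt ih =>
    exact ih h

-- the merge of two descending lists is descending
theorem mergeCommon_pairwise (xs ys : List Char)
    (hx : xs.Pairwise (fun a b => b ≤ a)) (hy : ys.Pairwise (fun a b => b ≤ a)) :
    (mergeCommon xs ys).Pairwise (fun a b => b ≤ a) := by
  fun_induction mergeCommon xs ys with
  | case1 => exact List.Pairwise.nil
  | case2 => exact List.Pairwise.nil
  | case3 as a bs ih =>
    refine List.Pairwise.cons ?_ (ih hx.of_cons hy.of_cons)
    intro x hmem
    exact (List.pairwise_cons.mp hx).1 x (mem_mergeCommon _ _ hmem)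
  | case4 a as b bs hab hlt ih =>
    exact ih hx.of_cons hy
  | case5 a as b bs hab hlt ih =>
    exact ih hx hy.of_cons

-- on descending inputs the merge computes the multiset min of the counts
theorem mergeCommon_count (xs ys : List Char)
    (hx : xs.Pairwise (fun a b => b ≤ a)) (hy : ys.Pairwise (fun a b => b ≤ a)) (c : Char) :
    (mergeCommon xs ys).count c = min (xs.count c) (ys.count c) := by
  fun_induction mergeCommon xs ys with
  | case1 => simp
  | case2 => simp
  | case3 as a bs ih =>
    simp only [List.count_cons, ih hx.of_cons hy.of_cons]
    by_cases hc : a = c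
    · simp [hc]
    · simp [hc]
  | case4 a as b bs hab hlt ih =>
    rw [ih hx.of_cons hy]
    by_cases hc : c = a
    · subst hc
      have hnot : c ∉ b :: bs := by
        intro hm
        rcases List.mem_cons.mp hm with h1 | h1
        · exact hab h1
        · exact absurd (lt_of_le_of_lt ((List.pairwise_cons.mp hy).1 c h1) hlt) (lt_irrefl c)
      have h0 : (b :: bs).count c = 0 := List.count_eq_zero.mpr hnot
      simp [h0]
    · have : ¬ a = c := fun h => hc h.symm
      simp [List.count_cons, this]
  | case5 a as b bs hab hlt ih =>
    rw [ih hx hy.of_cons]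
    have hba : a < b := lt_of_le_of_ne (le_of_not_gt hlt) hab
    by_cases hc : c = b
    · subst hc
      have hnot : c ∉ a :: as := by
        intro hm
        rcases List.mem_cons.mp hm with h1 | h1
        · exact hab h1.symm
        · exact absurd (lt_of_le_of_lt ((List.pairwise_cons.mp hx).1 c h1) hba) (lt_irrefl c)
      have h0 : (a :: as).count c = 0 := List.count_eq_zero.mpr hnot
      simp [h0]
    · have : ¬ b = c := fun h => hc h.symm
      simp [List.count_cons, this]

-- A's set test 'len(set(l)) == 1 and "0" in set(l)' says exactly: l is nonempty and all-'0'
theorem set_all_zero_iff (l : List Char) :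
    (PySem.Set.len (PySem.Set.ofList l) = 1 ∧ '0' ∈ PySem.Set.ofList l) ↔
      (l ≠ [] ∧ ∀ x ∈ l, x = '0') := by
  have hlen : PySem.Set.len (PySem.Set.ofList l) = ((PySem.Set.ofList l).length : Int) := rfl
  constructor
  · rintro ⟨h1, h2⟩
    have hl1 : (PySem.Set.ofList l).length = 1 := by omega
    rcases List.length_eq_one_iff.mp hl1 with ⟨z, hz⟩
    rw [hz] at h2
    have hz0 : z = '0' := (List.mem_singleton.mp h2).symm
    constructor
    · intro hnil; rw [hnil] at hz; simp [PySem.Set.ofList] at hz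
    · intro x hx
      have : x ∈ PySem.Set.ofList l := (PySem.Set.mem_ofList _ _).mpr hx
      rw [hz, hz0] at this
      exact List.mem_singleton.mp this
  · rintro ⟨hne, hall⟩
    have h0mem : '0' ∈ PySem.Set.ofList l := by
      rcases List.exists_mem_of_ne_nil l hne with ⟨a, ha⟩
      have := hall a ha
      exact (PySem.Set.mem_ofList _ _).mpr (this ▸ ha)
    have heq : PySem.Set.ofList l = ['0'] := by
      have hnd : (PySem.Set.ofList l).Nodup := PySem.Set.nodup_ofList l
      have hmem : ∀ y ∈ PySem.Set.ofList l, y = '0' := fun y hy =>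
        hall y ((PySem.Set.mem_ofList _ _).mp hy)
      cases hs : PySem.Set.ofList l with
      | nil => rw [hs] at h0mem; exact absurd h0mem (by simp)
      | cons z t =>
        rw [hs] at hmem hnd
        have hz : z = '0' := hmem z (by simp)
        cases t with
        | nil =>simp [hz]
        | cons w u =>
          have hw : w = '0' := hmem w (by simp)
          exact absurd (hz.trans hw.symm) (by
            intro h
            exact (List.pairwise_cons.mp hnd).1 w (by simp) h)
    rw [heq]
    exact ⟨by simp [PySem.Set.len], by simp⟩

-- ===== VERDICT (by name: the statement is the Claim_ definition above) =====
theorem solution_spec : Claim_equal_solution := by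
  intro X Y _
  unfold Spec_solution solution solution_alt
  simp only []
  set inter := (solutionLoop [] Y.toList X.toList).1 with hinter
  set xs := PySem.List.sorted X.toList (fun c : Char => c) true with hxs
  set ys := PySem.List.sorted Y.toList (fun c : Char => c) true with hys
  set res := mergeCommon xs ys with hres
  have hxp : xs.Pairwise (fun a b => b ≤ a) := PySem.List.sorted_pairwise_rev X.toList (fun c => c)
  have hyp : ys.Pairwise (fun a b => b ≤ a) := PySem.List.sorted_pairwise_rev Y.toList (fun c => c)
  have hcnt : ∀ c, inter.count c = res.count c := by
    intro c
    rw [hinter, solutionLoop_count, hres, mergeCommon_count xs ys hxp hyp,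
        (PySem.List.sorted_perm X.toList (fun c : Char => c) true).count_eq,
        (PySem.List.sorted_perm Y.toList (fun c : Char => c) true).count_eq]
    simp
  have hperm : inter.Perm res := List.perm_iff_count.mpr hcnt
  by_cases h0 : inter.length = 0
  · have : res = [] := List.length_eq_zero_iff.mp (hperm.length_eq ▸ h0)
    rw [if_pos h0, if_pos this]
  · have hresne : ¬ res = [] := by
      intro h; rw [h] at hperm; exact h0 (by simp [hperm.length_eq])
    rw [if_neg h0, if_neg hresne]
    have hiff := set_all_zero_iff inter
    by_cases hz : PySem.Set.len (PySem.Set.ofList inter) = 1 ∧ '0' ∈ PySem.Set.ofList inter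
    · have hall : ∀ x ∈ res, x = '0' := by
        intro x hx
        exact (hiff.mp hz).2 x (hperm.mem_iff.mpr hx)
      have : res.all (fun c => c == '0') = true := by
        rw [List.all_eq_true]; intro x hx; exact beq_iff_eq.mpr (hall x hx)
      rw [if_pos hz, if_pos this]
    · have : ¬ (res.all (fun c => c == '0') = true) := by
        intro hall
        apply hz
        apply hiff.mpr
        refine ⟨fun h => h0 (by simp [h]), ?_⟩
        intro x hx
        exact beq_iff_eq.mp (List.all_eq_true.mp hall x (hperm.mem_iff.mp hx))
      rw [if_neg hz, if_neg this]
      congr 1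
      refine List.Perm.eq_of_pairwise (le := fun a b : Char => b ≤ a) (fun a b _ _ h1 h2 => le_antisymm h2 h1) ?_ ?_ ((PySem.List.sorted_perm inter (fun c : Char => c) true).trans hperm)
      · exact PySem.List.sorted_pairwise_rev inter (fun c => c)
      · exact mergeCommon_pairwise xs ys hxp hyp
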